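-- pv_equiv track=rewrite | github.com/m4ll0k/Atlas | tamper/general_charunicodeescape.py | general_charunicodeescape
-- ===== SOURCE A (Python) =====
-- import string
--
-- def general_charunicodeescape(payload):
-- 	# -- general -- #
-- 	_payload = payload
-- 	if payload:
-- 		_payload = ""
-- 		i = 0
-- 		while i<len(payload):
-- 			if payload[i] == '%' and (i<len(payload)-2)and payload[i+1:i+2]in string.hexdigits and payload[i+2:i+3] in string.hexdigits:
-- 				_payload += "\\u00%s"%payload[i+1:i+3]
-- 				i += 3
-- 			else:
-- 				_payload += '\\u%.4X'%ord(payload[i])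
-- 				i += 1
-- 	return _payload
-- ===== SOURCE B (Python) =====
-- import re
--
-- _TOKEN = re.compile(r'%[0-9a-fA-F]{2}|.', re.DOTALL)
--
-- def general_charunicodeescape(payload):
--     # -- general -- #
--     if not payload:
--         return payload
--     return ''.join(
--         '\\u00' + t[1:] if len(t) == 3 else '\\u%.4X' % ord(t)
--         for t in _TOKEN.findall(payload)
--     )
-- ===== Notes on version B (the rewrite author's own statement) =====
-- stated objective: idiomatic
-- what changed: Replaced the hand-rolled while-loop index scan (slice tests against string.hexdigits, += string building) by regex tokenization: findall of a compiled DOTALL pattern matching a percent sign plus two hex digits or else any single character, a per-token escape expression, and str.join (which also removes the quadratic += string concatenation).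
import Mathlib
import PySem

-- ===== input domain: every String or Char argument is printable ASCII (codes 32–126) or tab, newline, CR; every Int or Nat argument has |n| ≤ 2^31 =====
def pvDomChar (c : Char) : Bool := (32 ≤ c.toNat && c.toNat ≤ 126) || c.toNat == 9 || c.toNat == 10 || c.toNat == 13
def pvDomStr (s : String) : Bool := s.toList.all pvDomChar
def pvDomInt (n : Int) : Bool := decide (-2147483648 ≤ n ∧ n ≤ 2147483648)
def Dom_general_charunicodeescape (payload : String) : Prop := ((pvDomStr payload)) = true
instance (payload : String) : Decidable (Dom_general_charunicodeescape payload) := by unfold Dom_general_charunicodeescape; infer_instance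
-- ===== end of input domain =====

-- B replaces A's index/while scan with regex tokenization (percent plus two hex digits, or any single char) followed by map+join; idiomatic, same cost.


-- ===== PORT A =====
-- membership of a one-char slice in string.hexdigits
def pvIsHexDig (c : Char) : Bool := "0123456789abcdefABCDEF".toList.contains c

-- one uppercase hex digit, as printed by '%X'
def pvHexDigU (n : Nat) : Char :=
  if n < 10 then Char.ofNat (48 + n) else Char.ofNat (55 + n)

-- '\u%.4X' % ord(c)
def pvEscChar (c : Char) : String :=
  "\\u" ++ String.ofList [pvHexDigU (c.toNat / 4096 % 16), pvHexDigU (c.toNat / 256 % 16),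
                          pvHexDigU (c.toNat / 16 % 16), pvHexDigU (c.toNat % 16)]

-- A's while loop over index i, transliterated on the remaining characters:
-- the '%'+two-hexdigit branch consumes 3 chars (i += 3), the else branch 1 (i += 1).
def pvALoop (acc : String) : List Char → String
  | [] => acc
  | '%' :: h1 :: h2 :: rest =>
      if pvIsHexDig h1 && pvIsHexDig h2 then
        pvALoop (acc ++ "\\u00" ++ String.ofList [h1, h2]) rest
      else
        pvALoop (acc ++ pvEscChar '%') (h1 :: h2 :: rest)
  | c :: rest => pvALoop (acc ++ pvEscChar c) rest
  termination_by cs => cs.length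
  decreasing_by all_goals (simp only [List.length_cons]; omega)

def general_charunicodeescape (payload : String) : String :=
  if payload = "" then payload else pvALoop "" payload.toList

-- ===== PORT B =====
-- re.findall(r'%[0-9a-fA-F]{2}|.', payload, re.DOTALL): the token list
def pvTokens : List Char → List (List Char)
  | [] => []
  | '%' :: h1 :: h2 :: rest =>
      if pvIsHexDig h1 && pvIsHexDig h2 then
        ['%', h1, h2] :: pvTokens rest
      else
        ['%'] :: pvTokens (h1 :: h2 :: rest)
  | c :: rest => [c] :: pvTokens rest
  termination_by cs => cs.length
  decreasing_by all_goals (simp only [List.length_cons]; omega)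

-- '\\u00' + t[1:] if len(t) == 3 else '\\u%.4X' % ord(t)
def pvTokOut (t : List Char) : String :=
  if t.length = 3 then "\\u00" ++ String.ofList (t.drop 1)
  else match t with
       | c :: _ => pvEscChar c
       | [] => ""   -- unreachable: findall tokens are nonempty

def general_charunicodeescape_alt (payload : String) : String :=
  if payload = "" then payload
  else String.join ((pvTokens payload.toList).map pvTokOut)

-- ===== PRECONDITION & SPEC =====
def Spec_general_charunicodeescape (payload : String) (out : String) : Prop := out = general_charunicodeescape_alt payload
instance (payload : String) (out : String) : Decidable (Spec_general_charunicodeescape payload out) := by unfold Spec_general_charunicodeescape; infer_instance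

-- ===== CLAIM (what is proved, stated in full; the proofs are below) =====
def Claim_equal_general_charunicodeescape : Prop := ∀ (payload : String), Dom_general_charunicodeescape payload → Spec_general_charunicodeescape payload (general_charunicodeescape payload)

-- ===== LEMMAS AND PROOFS =====
theorem str_foldl_append (l : List String) (a b : String) :
    List.foldl (fun r s => r ++ s) (a ++ b) l = a ++ List.foldl (fun r s => r ++ s) b l := by
  induction l generalizing b with
  | nil => simp
  | cons x xs ih => simp only [List.foldl_cons, String.append_assoc, ih]

theorem join_cons (x : String) (xs : List String) :
    String.join (x :: xs) = x ++ String.join xs := by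
  simp only [String.join, List.foldl_cons]
  have := str_foldl_append xs x ""
  simpa using this

theorem pvALoop_eq_tokens (cs : List Char) : ∀ acc : String,
    pvALoop acc cs = acc ++ String.join ((pvTokens cs).map pvTokOut) := by
  induction cs using pvTokens.induct with
  | case1 => intro acc; simp [pvALoop, pvTokens, String.join]
  | case2 h1 h2 rest hhex ih =>
      intro acc
      simp only [pvALoop, pvTokens, hhex, if_true]
      rw [ih, List.map_cons, join_cons]
      have ht : pvTokOut ['%', h1, h2] = "\\u00" ++ String.ofList [h1, h2] := by
        simp [pvTokOut]
      simp [ht, String.append_assoc]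
  | case3 h1 h2 rest hhex ih =>
      intro acc
      simp only [pvALoop, pvTokens, hhex, Bool.false_eq_true, if_false]
      rw [ih, List.map_cons, join_cons]
      have ht : pvTokOut ['%'] = pvEscChar '%' := by simp [pvTokOut]
      simp [ht, String.append_assoc]
  | case4 c rest hne ih =>
      intro acc
      have hA : pvALoop acc (c :: rest) = pvALoop (acc ++ pvEscChar c) rest := by
        rw [pvALoop.eq_def]; split <;> simp_all
      have hT : pvTokens (c :: rest) = [c] :: pvTokens rest := by
        rw [pvTokens.eq_def]; split <;> simp_all
      rw [hA, hT, ih, List.map_cons, join_cons]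
      have ht : pvTokOut [c] = pvEscChar c := by simp [pvTokOut]
      simp [ht, String.append_assoc]

-- ===== VERDICT (by name: the statement is the Claim_ definition above) =====
theorem general_charunicodeescape_spec : Claim_equal_general_charunicodeescape := by
  intro payload _
  unfold Spec_general_charunicodeescape general_charunicodeescape general_charunicodeescape_alt
  split
  · rfl
  · simpa using pvALoop_eq_tokens payload.toList ""
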